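-- pv_equiv track=rewrite | github.com/bycycle-org/bycycle.core | bycycle/core/services/route.py | _calculateWayToTurn
-- ===== SOURCE A (Python) =====
-- def _calculateWayToTurn(old_bearing, new_bearing):
--     """Given two bearings in [0, 360] gives the turn to go from old to new.
--
--     ``new_bearing`` -- The bearing of the new direction of travel.
--     ``old_bearing`` -- The bearing of the old direction of travel.
--
--     return `string` -- The way to turn to get from going in the old
--     direction to get going in the new direction ('right', 'left',
--     etc.).
--
--     """
--     diff = new_bearing - old_bearing
--     while diff < 0:
--         diff += 360
--     while diff > 360:
--         diff -= 360
--     if 0 <= diff < 10: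
--         way = 'straight'
--     elif 10 <= diff <= 170:
--         way = 'right'
--     elif 170 < diff < 190:
--         way = 'back'
--     elif 190 <= diff <= 350:
--         way = 'left'
--     elif 350 < diff <= 360:
--         way = 'straight'
--     else:
--         raise ValueError(
--             'Could not calculate way to turn from %s and %s' %
--             (new_bearing, old_bearing)
--         )
--     return way
-- ===== SOURCE B (Python) =====
-- def _calculateWayToTurn(old_bearing, new_bearing):
--     s = (new_bearing - old_bearing) % 360
--     if s > 180:
--         s -= 360
--     if -10 < s < 10:
--         return 'straight'
--     if abs(s) > 170:
--         return 'back'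
--     return 'right' if s > 0 else 'left'
-- ===== Notes on version B (the rewrite author's own statement) =====
-- stated objective: simpler
-- what changed: Replaces the two normalization while-loops and four sequential interval checks with a single modulo, a signed offset in (-180,180], and a magnitude-and-sign classification.
import Mathlib
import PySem

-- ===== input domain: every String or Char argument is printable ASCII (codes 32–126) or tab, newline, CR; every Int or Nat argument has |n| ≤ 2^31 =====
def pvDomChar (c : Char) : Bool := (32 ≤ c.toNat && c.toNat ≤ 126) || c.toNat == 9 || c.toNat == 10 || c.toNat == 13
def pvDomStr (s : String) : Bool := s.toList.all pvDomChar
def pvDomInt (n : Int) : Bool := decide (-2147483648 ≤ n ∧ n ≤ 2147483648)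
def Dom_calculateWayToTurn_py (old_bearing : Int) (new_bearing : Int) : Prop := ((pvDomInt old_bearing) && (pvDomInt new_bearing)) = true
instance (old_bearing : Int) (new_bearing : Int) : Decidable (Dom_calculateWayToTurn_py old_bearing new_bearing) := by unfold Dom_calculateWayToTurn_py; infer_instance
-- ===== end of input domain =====

-- B replaces A's two normalization while-loops and four sequential interval checks with one
-- modulo, a signed offset in (-180,180], and a magnitude-and-sign classification (simpler).

-- ===== PORT A =====
-- 'while diff < 0: diff += 360'
def pvUp (d : Int) : Int :=
  if d < 0 then pvUp (d + 360) else d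
termination_by (-d).toNat
decreasing_by omega

-- 'while diff > 360: diff -= 360'
def pvDown (d : Int) : Int :=
  if d > 360 then pvDown (d - 360) else d
termination_by d.toNat
decreasing_by omega

def calculateWayToTurn_py (old_bearing : Int) (new_bearing : Int) : String :=
  let diff := pvDown (pvUp (new_bearing - old_bearing))
  if 0 ≤ diff ∧ diff < 10 then "straight"
  else if 10 ≤ diff ∧ diff ≤ 170 then "right"
  else if 170 < diff ∧ diff < 190 then "back"
  else if 190 ≤ diff ∧ diff ≤ 350 then "left"
  else if 350 < diff ∧ diff ≤ 360 then "straight"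
  else ""  -- Python raises ValueError here; unreachable for Int inputs (diff ∈ [0,360] after normalization)

-- ===== PORT B =====
def calculateWayToTurn_py_alt (old_bearing : Int) (new_bearing : Int) : String :=
  let s0 := PySem.Int.mod (new_bearing - old_bearing) 360
  let s := if s0 > 180 then s0 - 360 else s0
  if -10 < s ∧ s < 10 then "straight"
  else if |s| > 170 then "back"
  else if s > 0 then "right" else "left"

-- ===== PRECONDITION & SPEC =====
def Spec_calculateWayToTurn_py (old_bearing : Int) (new_bearing : Int) (out : String) : Prop := out = calculateWayToTurn_py_alt old_bearing new_bearing
instance (old_bearing : Int) (new_bearing : Int) (out : String) : Decidable (Spec_calculateWayToTurn_py old_bearing new_bearing out) := by unfold Spec_calculateWayToTurn_py; infer_instance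

-- ===== CLAIM (what is proved, stated in full; the proofs are below) =====
def Claim_equal_calculateWayToTurn_py : Prop := ∀ (old_bearing : Int) (new_bearing : Int), Dom_calculateWayToTurn_py old_bearing new_bearing → Spec_calculateWayToTurn_py old_bearing new_bearing (calculateWayToTurn_py old_bearing new_bearing)

-- ===== LEMMAS AND PROOFS =====
theorem pvUp_nonneg (d : Int) : 0 ≤ pvUp d := by
  induction d using pvUp.induct with
  | case1 d h ih => rw [pvUp]; simpa [h] using ih
  | case2 d h => rw [pvUp]; simp [h]; omega

theorem pvUp_emod (d : Int) : pvUp d % 360 = d % 360 := by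
  induction d using pvUp.induct with
  | case1 d h ih => rw [pvUp]; simp [h]; omega
  | case2 d h => rw [pvUp]; simp [h]

theorem pvDown_le (d : Int) : pvDown d ≤ 360 := by
  induction d using pvDown.induct with
  | case1 d h ih => rw [pvDown]; simpa [h] using ih
  | case2 d h => rw [pvDown]; simp [h]; omega

theorem pvDown_nonneg (d : Int) (hd : 0 ≤ d) : 0 ≤ pvDown d := by
  induction d using pvDown.induct with
  | case1 d h ih => rw [pvDown]; simp [h]; exact ih (by omega)
  | case2 d h => rw [pvDown]; simpa [h] using hd

theorem pvDown_emod (d : Int) : pvDown d % 360 = d % 360 := by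
  induction d using pvDown.induct with
  | case1 d h ih => rw [pvDown]; simp [h]; omega
  | case2 d h => rw [pvDown]; simp [h]

-- ===== VERDICT (by name: the statement is the Claim_ definition above) =====
theorem calculateWayToTurn_py_spec : Claim_equal_calculateWayToTurn_py := by
  intro o n _
  unfold Spec_calculateWayToTurn_py calculateWayToTurn_py calculateWayToTurn_py_alt
  rw [PySem.Int.mod_eq_emod_of_pos (by omega)]
  have h1 := pvUp_nonneg (n - o)
  have h2 := pvDown_nonneg (pvUp (n - o)) h1
  have h3 := pvDown_le (pvUp (n - o))
  have h4 : pvDown (pvUp (n - o)) % 360 = (n - o) % 360 := by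
    rw [pvDown_emod, pvUp_emod]
  have h5 : 0 ≤ (n - o) % 360 := Int.emod_nonneg _ (by omega)
  have h6 : (n - o) % 360 < 360 := Int.emod_lt_of_pos _ (by omega)
  generalize hDg : pvDown (pvUp (n - o)) = D at h2 h3 h4 ⊢
  generalize hrg : (n - o) % 360 = r at h4 h5 h6 ⊢
  simp only []
  have hDr : D = r ∨ (D = 360 ∧ r = 0) := by omega
  by_cases h180 : (180:Int) < r
  · rw [if_pos h180, abs_of_nonpos (by omega : r - 360 ≤ 0)]
    rcases hDr with h | ⟨h, h0⟩ <;> subst h <;> split_ifs <;> first | rfl | omega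
  · rw [if_neg h180, abs_of_nonneg h5]
    rcases hDr with h | ⟨h, h0⟩ <;> subst h <;> split_ifs <;> first | rfl | omega
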